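-- pv_equiv track=rewrite | github.com/yng4/xdelta3-gui | xdelta3 gui工具.py | parse_xdelta_output
-- ===== SOURCE A (Python) =====
-- def parse_xdelta_output(output):
--     """
--     解析xdelta3命令行输出获取进度百分比
--     示例输出行: "50% completed, 1234/5678 bytes"
--     """
--     try:
--         # 查找百分比数字
--         percent_index = output.find('%')
--         if percent_index > 0:
--             # 提取百分比前的数字
--             num_str = ''
--             i = percent_index - 1
--             while i >= 0 and output[i].isdigit():
--                 num_str = output[i] + num_str
--                 i -= 1
--
--             if num_str:
--                 return int(num_str)
--     except:
--         pass
--     return None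
-- ===== SOURCE B (Python) =====
-- def parse_xdelta_output(output):
--     """
--     解析xdelta3命令行输出获取进度百分比
--     示例输出行: "50% completed, 1234/5678 bytes"
--     """
--     try:
--         idx = output.find('%')
--         if idx <= 0:
--             return None
--         run = ''
--         for ch in output[:idx]:
--             run = run + ch if ch.isdigit() else ''
--         return int(run) if run else None
--     except:
--         return None
-- ===== Notes on version B (the rewrite author's own statement) =====
-- stated objective: alternative
-- what changed: Replaces the index-based backward while-loop collecting digits just before the first percent sign with a single forward pass over the prefix before it, maintaining the current digit run (reset on any non-digit) whose final value is the number.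
import Mathlib
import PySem

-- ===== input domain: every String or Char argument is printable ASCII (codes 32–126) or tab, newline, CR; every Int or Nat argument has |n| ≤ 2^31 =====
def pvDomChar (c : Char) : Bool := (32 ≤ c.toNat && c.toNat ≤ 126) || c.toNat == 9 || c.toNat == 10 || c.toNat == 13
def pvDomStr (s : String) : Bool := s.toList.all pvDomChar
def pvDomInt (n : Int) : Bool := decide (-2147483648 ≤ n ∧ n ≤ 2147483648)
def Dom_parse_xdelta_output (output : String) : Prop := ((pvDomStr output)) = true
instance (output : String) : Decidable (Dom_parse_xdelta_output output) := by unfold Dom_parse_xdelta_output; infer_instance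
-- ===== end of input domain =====

-- B replaces A's backward index while-loop before the first '%' by a single forward pass
-- over output[:idx] keeping the current digit run (alternative decomposition, same cost).

-- ===== PORT A =====
-- A's `while i >= 0 and output[i].isdigit(): num_str = output[i] + num_str; i -= 1`;
-- an IndexError (pyGet? = none) would be swallowed by A's `except` into None, hence Option.
def pvALoop (cs : List Char) (i : Int) (num : List Char) : Option (List Char) :=
  if 0 ≤ i then
    match PySem.List.pyGet? cs i with
    | some c => if PySem.Chars.isdigit c then pvALoop cs (i - 1) (c :: num) else some num
    | none => none
  else some num
termination_by (i + 1).toNat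
decreasing_by omega

def parse_xdelta_output (output : String) : Option Int :=
  let percent_index := PySem.Str.find output "%"
  if percent_index > 0 then
    match pvALoop output.toList (percent_index - 1) [] with
    | none => none          -- IndexError → except → None (unreachable in fact)
    | some num_str => if num_str.isEmpty then none else PySem.Int.ofChars? num_str
  else none

-- ===== PORT B =====
def parse_xdelta_output_alt (output : String) : Option Int :=
  let idx := PySem.Str.find output "%"
  if idx ≤ 0 then none
  else
    let run := (PySem.List.slice output.toList none (some idx)).foldl
      (fun run c => if PySem.Chars.isdigit c then run ++ [c] else []) []
    if run.isEmpty then none else PySem.Int.ofChars? run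

-- ===== PRECONDITION & SPEC =====
def Spec_parse_xdelta_output (output : String) (out : Option Int) : Prop := out = parse_xdelta_output_alt output
instance (output : String) (out : Option Int) : Decidable (Spec_parse_xdelta_output output out) := by unfold Spec_parse_xdelta_output; infer_instance

-- ===== CLAIM (what is proved, stated in full; the proofs are below) =====
def Claim_equal_parse_xdelta_output : Prop := ∀ (output : String), Dom_parse_xdelta_output output → Spec_parse_xdelta_output output (parse_xdelta_output output)

-- ===== LEMMAS AND PROOFS =====

-- the trailing digit run of a list
def pvRun (l : List Char) : List Char := (l.reverse.takeWhile PySem.Chars.isdigit).reverse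

theorem pvTW_len_iff (p : Char → Bool) (xs : List Char) :
    ((xs.takeWhile p).length = xs.length) ↔ xs.all p := by
  constructor
  · intro h
    have := (List.takeWhile_prefix (p := p) (l := xs)).eq_of_length h
    simpa [List.all_eq_true] using List.takeWhile_eq_self_iff.1 this
  · intro h
    rw [List.takeWhile_eq_self_iff.2 (by simpa [List.all_eq_true] using h)]

theorem pvRun_all (l : List Char) (h : l.all PySem.Chars.isdigit) : pvRun l = l := by
  rw [pvRun, List.takeWhile_eq_self_iff.2
    (fun x hx => List.all_eq_true.1 h x (List.mem_reverse.1 hx)), List.reverse_reverse]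

theorem pvRun_snoc (l : List Char) (c : Char) :
    pvRun (l ++ [c]) = if PySem.Chars.isdigit c then pvRun l ++ [c] else [] := by
  simp [pvRun, List.takeWhile_cons]
  split_ifs <;> simp

theorem pvRun_cons_of_not_all (l : List Char) (c : Char) (h : ¬ l.all PySem.Chars.isdigit) :
    pvRun (c :: l) = pvRun l := by
  have hlen : ¬ ((l.reverse.takeWhile PySem.Chars.isdigit).length = l.reverse.length) := by
    rw [pvTW_len_iff, List.all_reverse]; exact h
  simp only [pvRun, List.reverse_cons, List.takeWhile_append, if_neg hlen]

theorem pvRun_cons_of_all (l : List Char) (c : Char) (hl : l.all PySem.Chars.isdigit)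
    (hc : ¬ PySem.Chars.isdigit c) : pvRun (c :: l) = l := by
  have hlen : (l.reverse.takeWhile PySem.Chars.isdigit).length = l.reverse.length := by
    rw [pvTW_len_iff, List.all_reverse]; exact hl
  simp [pvRun, List.takeWhile_append, hlen, hc]

theorem pvB_foldl (l acc : List Char) :
    l.foldl (fun run c => if PySem.Chars.isdigit c then run ++ [c] else []) acc
      = if l.all PySem.Chars.isdigit then acc ++ l else pvRun l := by
  induction l generalizing acc with
  | nil => simp
  | cons c l ih =>
    simp only [List.foldl_cons]
    by_cases hc : PySem.Chars.isdigit c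
    · rw [if_pos hc, ih]
      by_cases hl : l.all PySem.Chars.isdigit
      · simp [hl, hc]
      · simp [hl, hc, pvRun_cons_of_not_all l c hl]
    · rw [if_neg hc, ih]
      by_cases hl : l.all PySem.Chars.isdigit
      · simp [hc, hl, pvRun_cons_of_all l c hl hc]
      · simp [hc, hl, pvRun_cons_of_not_all l c hl]

theorem pvALoop_spec (cs : List Char) (n : Nat) (h : n ≤ cs.length) (num : List Char) :
    pvALoop cs ((n : Int) - 1) num = some (pvRun (cs.take n) ++ num) := by
  induction n generalizing num with
  | zero => rw [pvALoop]; simp [pvRun]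
  | succ n ih =>
    rw [pvALoop]
    have hn : n < cs.length := by omega
    have hget : PySem.List.pyGet? cs (((n : Nat) + 1 : Nat) - 1 : Int) = some cs[n] := by
      have h1 : ((((n : Nat) + 1 : Nat) : Int) - 1) = ((n : Nat) : Int) := by push_cast; omega
      rw [h1, PySem.List.pyGet?_natCast]
      simp [hn]
    have htake : cs.take (n + 1) = cs.take n ++ [cs[n]] := by
      rw [List.take_add_one]
      simp [List.getElem?_eq_getElem hn]
    have h2 : ((((n : Nat) + 1 : Nat) : Int) - 1 - 1) = ((n : Nat) : Int) - 1 := by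
      push_cast; omega
    rw [if_pos (by push_cast; omega), hget]
    simp only [h2]
    by_cases hd : PySem.Chars.isdigit cs[n]
    · rw [if_pos hd, ih (show n ≤ cs.length by omega), htake, pvRun_snoc, if_pos hd]
      simp
    · rw [if_neg hd, htake, pvRun_snoc, if_neg hd]
      simp

-- ===== VERDICT (by name: the statement is the Claim_ definition above) =====
theorem parse_xdelta_output_spec : Claim_equal_parse_xdelta_output := by
  intro output _
  unfold Spec_parse_xdelta_output parse_xdelta_output parse_xdelta_output_alt
  simp only [PySem.Str.find_eq]
  set cs := output.toList with hcs
  set idx := PySem.Chars.find cs "%".toList with hidx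
  by_cases hpos : idx > 0
  · have hnonneg : 0 ≤ idx := le_of_lt hpos
    have hle : idx ≤ cs.length := PySem.Chars.find_le_length cs "%".toList
    have hkle : idx.toNat ≤ cs.length := by omega
    have hA : pvALoop cs (idx - 1) [] = some (pvRun (cs.take idx.toNat)) := by
      rw [show idx - 1 = ((idx.toNat : Nat) : Int) - 1 by omega,
        pvALoop_spec cs idx.toNat hkle []]
      simp
    rw [if_pos hpos, if_neg (by omega), hA, PySem.List.slice_to cs hnonneg, pvB_foldl]
    by_cases hall : (cs.take idx.toNat).all PySem.Chars.isdigit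
    · simp [hall, pvRun_all _ hall]
    · simp [hall]
  · rw [if_neg hpos, if_pos (by omega)]
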